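-- pv_equiv track=rewrite | github.com/randysim/news-to-go | backend/modules/video/generate_captions.py | find_next_match
-- ===== SOURCE A (Python) =====
-- def find_next_match(script_words, script_idx, captions, caption_idx, max_lookahead=5):
--     """Find the next point where script and captions match again, with limited lookahead."""
--     # Limit how far ahead we look to avoid matching with words much later in the script
--     max_script_idx = min(script_idx + max_lookahead, len(script_words))
--     max_caption_idx = min(caption_idx + max_lookahead, len(captions))
--
--     for s_idx in range(script_idx + 1, max_script_idx):
--         for c_idx in range(caption_idx + 1, max_caption_idx):
--             if script_words[s_idx].strip().lower() == captions[c_idx][0].lower():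
--                 # Found a match within our lookahead window
--                 return s_idx, c_idx
--
--     # No match found within lookahead window
--     return None
-- ===== SOURCE B (Python) =====
-- def find_next_match(script_words, script_idx, captions, caption_idx, max_lookahead=5):
--     """Find the next point where script and captions match again, with limited lookahead.
--
--     Indexes the caption window once (lowercased word -> first c_idx), then scans the
--     script window in a single pass, instead of A's nested scan.
--     """
--     s_end = min(script_idx + max_lookahead, len(script_words))
--     c_end = min(caption_idx + max_lookahead, len(captions))
--     if s_end <= script_idx + 1 or c_end <= caption_idx + 1:
--         return None  # an empty window on either side: nothing to match
--     first_at = {}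
--     for c in range(caption_idx + 1, c_end):
--         first_at.setdefault(captions[c][0].lower(), c)
--     for s in range(script_idx + 1, s_end):
--         c = first_at.get(script_words[s].strip().lower())
--         if c is not None:
--             return s, c
--     return None
-- ===== Notes on version B (the rewrite author's own statement) =====
-- stated objective: alternative
-- what changed: Replaces the nested script-by-caption scan with a one-time dict (setdefault) indexing each caption-window word to its first c_idx, then a single .get-lookup pass over the script window (with an early None when either window is empty).
import Mathlib
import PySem

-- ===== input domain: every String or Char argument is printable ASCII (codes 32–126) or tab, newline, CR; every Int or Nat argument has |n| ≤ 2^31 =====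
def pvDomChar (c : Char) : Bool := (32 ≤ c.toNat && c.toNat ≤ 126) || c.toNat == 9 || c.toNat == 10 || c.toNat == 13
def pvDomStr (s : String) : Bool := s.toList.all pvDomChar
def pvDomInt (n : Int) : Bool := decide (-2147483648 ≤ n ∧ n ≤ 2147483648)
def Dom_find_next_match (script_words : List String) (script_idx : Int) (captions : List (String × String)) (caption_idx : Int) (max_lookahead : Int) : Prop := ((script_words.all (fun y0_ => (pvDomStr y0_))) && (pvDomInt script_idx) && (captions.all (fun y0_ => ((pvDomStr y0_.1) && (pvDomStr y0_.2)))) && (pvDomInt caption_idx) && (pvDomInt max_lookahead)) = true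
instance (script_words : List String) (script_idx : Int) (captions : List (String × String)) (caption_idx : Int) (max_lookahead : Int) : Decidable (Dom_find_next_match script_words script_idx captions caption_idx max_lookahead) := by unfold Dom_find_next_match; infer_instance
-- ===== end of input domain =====

-- B indexes the caption window once (word -> first c_idx) and makes a single pass over the
-- script window, replacing A's nested scan (objective: alternative algorithm, same observable results).


-- ===== PORT A =====
def find_next_match (script_words : List String) (script_idx : Int) (captions : List (String × String)) (caption_idx : Int) (max_lookahead : Int) : Option (Int × Int) :=
  let max_script_idx := min (script_idx + max_lookahead) (script_words.length : Int)
  let max_caption_idx := min (caption_idx + max_lookahead) (captions.length : Int)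
  (PySem.List.pyRange (script_idx + 1) max_script_idx 1).foldl (fun acc s_idx =>
    match acc with
    | some r => some r
    | none =>
      (PySem.List.pyRange (caption_idx + 1) max_caption_idx 1).foldl (fun acc2 c_idx =>
        match acc2 with
        | some r => some r
        | none =>
          if PySem.Str.lower (PySem.Str.strip (PySem.List.pyGetD script_words s_idx "")) =
             PySem.Str.lower (PySem.List.pyGetD captions c_idx ("", "")).1
          then some (s_idx, c_idx) else none) none) none

-- ===== PORT B =====
def find_next_match_alt (script_words : List String) (script_idx : Int) (captions : List (String × String)) (caption_idx : Int) (max_lookahead : Int) : Option (Int × Int) :=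
  let s_end := min (script_idx + max_lookahead) (script_words.length : Int)
  let c_end := min (caption_idx + max_lookahead) (captions.length : Int)
  if s_end ≤ script_idx + 1 ∨ c_end ≤ caption_idx + 1 then none
  else
    let first_at :=
      (PySem.List.pyRange (caption_idx + 1) c_end 1).foldl (fun d c_idx =>
        let key := PySem.Str.lower (PySem.List.pyGetD captions c_idx ("", "")).1
        if (d.get? key).isSome then d else d.insert key c_idx) (PySem.Dict.empty)
    (PySem.List.pyRange (script_idx + 1) s_end 1).foldl (fun acc s_idx =>
      match acc with
      | some r => some r
      | none =>
        match first_at.get? (PySem.Str.lower (PySem.Str.strip (PySem.List.pyGetD script_words s_idx ""))) with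
        | some c_idx => some (s_idx, c_idx)
        | none => none) none

-- ===== PRECONDITION & SPEC =====
-- Pre_ excludes exactly the inputs on which Python A raises IndexError: both lookahead windows
-- nonempty but the first scanned index on one side is more negative than its list's length.
def Pre_find_next_match (script_words : List String) (script_idx : Int) (captions : List (String × String)) (caption_idx : Int) (max_lookahead : Int) : Prop :=
  (script_idx + max_lookahead ≤ script_idx + 1 ∨ (script_words.length : Int) ≤ script_idx + 1) ∨
  (caption_idx + max_lookahead ≤ caption_idx + 1 ∨ (captions.length : Int) ≤ caption_idx + 1) ∨
  (-(script_words.length : Int) ≤ script_idx + 1 ∧ -(captions.length : Int) ≤ caption_idx + 1)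
instance (script_words : List String) (script_idx : Int) (captions : List (String × String)) (caption_idx : Int) (max_lookahead : Int) : Decidable (Pre_find_next_match script_words script_idx captions caption_idx max_lookahead) := by unfold Pre_find_next_match; infer_instance

def pvWitness_find_next_match : List String × Int × (List (String × String)) × Int × Int :=
  (["hello", "world"], 0, [("world", "x")], -1, 5)

def Spec_find_next_match (script_words : List String) (script_idx : Int) (captions : List (String × String)) (caption_idx : Int) (max_lookahead : Int) (out : Option (Int × Int)) : Prop := out = find_next_match_alt script_words script_idx captions caption_idx max_lookahead
instance (script_words : List String) (script_idx : Int) (captions : List (String × String)) (caption_idx : Int) (max_lookahead : Int) (out : Option (Int × Int)) : Decidable (Spec_find_next_match script_words script_idx captions caption_idx max_lookahead out) := by unfold Spec_find_next_match; infer_instance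

-- ===== CLAIM =====
def Claim_equal_find_next_match : Prop := ∀ (script_words : List String) (script_idx : Int) (captions : List (String × String)) (caption_idx : Int) (max_lookahead : Int), Dom_find_next_match script_words script_idx captions caption_idx max_lookahead → Pre_find_next_match script_words script_idx captions caption_idx max_lookahead → Spec_find_next_match script_words script_idx captions caption_idx max_lookahead (find_next_match script_words script_idx captions caption_idx max_lookahead)

-- ===== LEMMAS AND PROOFS =====

/-- A fold whose step keeps `none` at `none` and is constant on `some` stays at `none`
when every step from `none` yields `none`; here: the inner scan over an empty caption
range keeps the accumulator `none`. -/
theorem pv_foldl_none {α : Type} (L : List Int)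
    (f : Option α → Int → Option α)
    (h : ∀ x, f none x = none) : L.foldl f none = none := by
  induction L with
  | nil => rfl
  | cons x xs ih => simp only [List.foldl_cons, h]; exact ih

/-- Folding two pointwise-equal step functions from the same start gives the same result. -/
theorem pv_foldl_congr {α β : Type} (L : List α) (f g : β → α → β) (init : β)
    (h : ∀ b a, f b a = g b a) : L.foldl f init = L.foldl g init := by
  induction L generalizing init with
  | nil => rfl
  | cons x xs ih => simp only [List.foldl_cons, h]; exact ih _

/-- A's inner first-match scan over `L` equals looking the key up in the
first-occurrence dictionary B builds by folding over the same `L`. -/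
theorem pv_dict_first_match (f : Int → String) (s : Int) (k : String) (L : List Int)
    (d : PySem.Dict String Int) :
    L.foldl (fun acc c => match acc with
               | some r => some r
               | none => if k = f c then some (s, c) else none)
      (match d.get? k with | some c => some (s, c) | none => none)
    = match (L.foldl (fun d c => if (d.get? (f c)).isSome then d else d.insert (f c) c) d).get? k with
      | some c => some (s, c) | none => none := by
  induction L generalizing d with
  | nil => rfl
  | cons c L ih =>
    simp only [List.foldl_cons]
    refine Eq.trans ?_ (ih (if (d.get? (f c)).isSome then d else d.insert (f c) c))
    congr 1
    cases hdk : d.get? k with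
    | some c0 =>
      by_cases hc : (d.get? (f c)).isSome = true
      · simp [hdk, hc]
      · have hne : k ≠ f c := by
          intro h; rw [← h, hdk] at hc; simp at hc
        simp [hdk, hc, PySem.Dict.get?_insert, hne]
    | none =>
      by_cases hkc : k = f c
      · have hc : (d.get? (f c)).isSome = false := by rw [← hkc, hdk]; rfl
        simp [hc, hkc]
      · by_cases hc : (d.get? (f c)).isSome = true
        · simp [hdk, hc, hkc]
        · simp [hdk, hc, hkc, PySem.Dict.get?_insert]

theorem pv_eq_on_pre (script_words : List String) (script_idx : Int)
    (captions : List (String × String)) (caption_idx : Int) (max_lookahead : Int) :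
    find_next_match script_words script_idx captions caption_idx max_lookahead
      = find_next_match_alt script_words script_idx captions caption_idx max_lookahead := by
  unfold find_next_match find_next_match_alt
  by_cases hg : min (script_idx + max_lookahead) (script_words.length : Int) ≤ script_idx + 1 ∨
      min (caption_idx + max_lookahead) (captions.length : Int) ≤ caption_idx + 1
  · simp only [if_pos hg]
    rcases hg with hs | hc
    · rw [PySem.List.pyRange_one_eq_nil hs]; rfl
    · rw [PySem.List.pyRange_one_eq_nil hc]
      apply pv_foldl_none
      intro x; rfl
  · simp only [if_neg hg]
    apply pv_foldl_congr
    intro acc s_idx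
    cases acc with
    | some r => rfl
    | none =>
      have := pv_dict_first_match
        (fun c_idx => PySem.Str.lower (PySem.List.pyGetD captions c_idx ("", "")).1)
        s_idx
        (PySem.Str.lower (PySem.Str.strip (PySem.List.pyGetD script_words s_idx "")))
        (PySem.List.pyRange (caption_idx + 1)
          (min (caption_idx + max_lookahead) (captions.length : Int)) 1)
        PySem.Dict.empty
      simpa using this

-- ===== VERDICT =====
theorem find_next_match_spec : Claim_equal_find_next_match := by
  intro sw si caps ci ml _ _
  unfold Spec_find_next_match
  exact pv_eq_on_pre sw si caps ci ml
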